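-- pv_equiv track=rewrite | github.com/hyprpranav/Medha2026 | scripts/upload_teams.py | parse_members
-- ===== SOURCE A (Python) =====
-- def parse_members(row, headers):
--     """Extract members list from a row."""
--     members = []
--
--     # Member 1
--     name1_idx = next((i for i, h in enumerate(headers) if h and "Name of the Member 1" in str(h)), None)
--     dept1_idx = next((i for i, h in enumerate(headers) if h and "Year & Dept" in str(h) and "2" not in str(h) and "3" not in str(h) and "4" not in str(h)), None)
--
--     # Member 2
--     name2_idx = next((i for i, h in enumerate(headers) if h and "Name of the Member 2" in str(h)), None)
--     dept2_idx = next((i for i, h in enumerate(headers) if h and "Eg: IV - ECE 2" in str(h)), None)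
--
--     # Member 3
--     name3_idx = next((i for i, h in enumerate(headers) if h and "Name of the Member 3" in str(h)), None)
--     dept3_idx = next((i for i, h in enumerate(headers) if h and "Eg: IV - ECE 3" in str(h)), None)
--
--     # Member 4
--     name4_idx = next((i for i, h in enumerate(headers) if h and "Name of the Member 4" in str(h)), None)
--     dept4_idx = next((i for i, h in enumerate(headers) if h and "Eg: IV - ECE 4" in str(h)), None)
--
--     # Extract members by index
--     member_pairs = [
--         (name1_idx, dept1_idx),
--         (name2_idx, dept2_idx),
--         (name3_idx, dept3_idx),
--         (name4_idx, dept4_idx),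
--     ]
--
--     for name_idx, dept_idx in member_pairs:
--         if name_idx is not None and name_idx < len(row):
--             name = row[name_idx]
--             if name and str(name).strip() and str(name).strip() not in ["-", "No", "None", "Nil"]:
--                 dept = ""
--                 if dept_idx is not None and dept_idx < len(row):
--                     dept = str(row[dept_idx] or "").strip()
--                     if dept in ["-", "No", "None", "Nil"]:
--                         dept = ""
--                 members.append({
--                     "name": str(name).strip(),
--                     "dept": dept,
--                 })
--
--     return members
-- ===== SOURCE B (Python) =====
-- BAD = {"-", "No", "None", "Nil"}
--
-- _SLOTS = [
--     ("n1", lambda s: "Name of the Member 1" in s),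
--     ("d1", lambda s: "Year & Dept" in s and "2" not in s and "3" not in s and "4" not in s),
--     ("n2", lambda s: "Name of the Member 2" in s),
--     ("d2", lambda s: "Eg: IV - ECE 2" in s),
--     ("n3", lambda s: "Name of the Member 3" in s),
--     ("d3", lambda s: "Eg: IV - ECE 3" in s),
--     ("n4", lambda s: "Name of the Member 4" in s),
--     ("d4", lambda s: "Eg: IV - ECE 4" in s),
-- ]
--
-- def parse_members(row, headers):
--     """One zipped pass over headers+row capturing each slot's CELL VALUE at its
--     first matching header (no index table); extraction then never touches row."""
--     vals = {}
--     for i, h in enumerate(headers):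
--         if not h:
--             continue
--         hs = str(h)
--         cell = row[i] if i < len(row) else None
--         for slot, pred in _SLOTS:
--             if slot not in vals and pred(hs):
--                 vals[slot] = cell
--     members = []
--     for k in "1234":
--         name = vals.get("n" + k)
--         if not name:
--             continue
--         name = str(name).strip()
--         if not name or name in BAD:
--             continue
--         dept = str(vals.get("d" + k) or "").strip()
--         members.append({"name": name, "dept": "" if dept in BAD else dept})
--     return members
-- ===== Notes on version B (the rewrite author's own statement) =====
-- stated objective: faster
-- what changed: B never builds an index table: a single zipped pass over headers captures each slot's cell VALUE (via a slot/predicate table into a dict keyed by slot name) at its first matching header, so the extraction loop works purely on those captured values without ever consulting row or any index, whereas A runs eight separate next() index scans over headers and then indexes into row.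
import Mathlib
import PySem

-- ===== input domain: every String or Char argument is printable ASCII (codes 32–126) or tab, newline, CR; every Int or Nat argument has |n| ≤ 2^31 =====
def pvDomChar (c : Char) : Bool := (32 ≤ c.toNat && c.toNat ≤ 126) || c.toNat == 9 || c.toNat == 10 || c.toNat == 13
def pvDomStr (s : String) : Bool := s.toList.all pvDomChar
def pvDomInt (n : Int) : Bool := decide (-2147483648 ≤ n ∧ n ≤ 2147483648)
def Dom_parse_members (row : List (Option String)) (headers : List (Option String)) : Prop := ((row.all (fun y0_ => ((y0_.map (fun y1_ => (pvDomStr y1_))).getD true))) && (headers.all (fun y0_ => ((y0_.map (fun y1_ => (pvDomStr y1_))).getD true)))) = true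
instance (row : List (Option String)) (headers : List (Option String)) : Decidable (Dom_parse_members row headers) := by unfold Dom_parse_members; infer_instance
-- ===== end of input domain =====

-- B replaces A's eight index scans + row indexing with one zipped header/row pass that captures each slot's cell VALUE into a dict; return values proved equal.


-- ===== PORT A =====
-- next((i for i, h in enumerate(headers) if h and <pred>(str(h))), None): scan until first truthy header matching pred
def findHdrA (q : Option String → Bool) : List (Int × Option String) → Option Int
  | [] => none
  | (i, h) :: t => if q h then some i else findHdrA q t

-- body of A's "for name_idx, dept_idx in member_pairs" loop
def pvExtractA (row : List (Option String)) (members : List (List (String × String))) (pr : Option Int × Option Int) : List (List (String × String)) :=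
  match pr.1 with
  | none => members
  | some nIdx =>
    if nIdx < (row.length : Int) then
      match PySem.List.pyGetD row nIdx none with
      | none => members
      | some s =>
        let t := PySem.Str.strip s
        if !(s == "") && !(t == "") && !(["-", "No", "None", "Nil"].contains t) then
          let dept :=
            match pr.2 with
            | some dIdx =>
              if dIdx < (row.length : Int) then
                let d := PySem.Str.strip ((PySem.List.pyGetD row dIdx none).getD "")
                if ["-", "No", "None", "Nil"].contains d then "" else d
              else ""
            | none => ""
          members ++ [[("name", t), ("dept", dept)]]
        else members
    else members

def parse_members (row : List (Option String)) (headers : List (Option String)) : List (List (String × String)) :=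
  let e := PySem.List.enumerate headers 0
  let name1 := findHdrA (fun h => match h with | some s => !(s == "") && PySem.Str.isIn "Name of the Member 1" s | none => false) e
  let dept1 := findHdrA (fun h => match h with | some s => !(s == "") && (PySem.Str.isIn "Year & Dept" s && !PySem.Str.isIn "2" s && !PySem.Str.isIn "3" s && !PySem.Str.isIn "4" s) | none => false) e
  let name2 := findHdrA (fun h => match h with | some s => !(s == "") && PySem.Str.isIn "Name of the Member 2" s | none => false) e
  let dept2 := findHdrA (fun h => match h with | some s => !(s == "") && PySem.Str.isIn "Eg: IV - ECE 2" s | none => false) e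
  let name3 := findHdrA (fun h => match h with | some s => !(s == "") && PySem.Str.isIn "Name of the Member 3" s | none => false) e
  let dept3 := findHdrA (fun h => match h with | some s => !(s == "") && PySem.Str.isIn "Eg: IV - ECE 3" s | none => false) e
  let name4 := findHdrA (fun h => match h with | some s => !(s == "") && PySem.Str.isIn "Name of the Member 4" s | none => false) e
  let dept4 := findHdrA (fun h => match h with | some s => !(s == "") && PySem.Str.isIn "Eg: IV - ECE 4" s | none => false) e
  let member_pairs := [(name1, dept1), (name2, dept2), (name3, dept3), (name4, dept4)]
  member_pairs.foldl (pvExtractA row) []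

-- ===== PORT B =====
def pvBad : List String := ["-", "No", "None", "Nil"]

-- _SLOTS: the slot/predicate classification table of Source B
def pvSLOTS : List (String × (String → Bool)) :=
  [ ("n1", fun s => PySem.Str.isIn "Name of the Member 1" s),
    ("d1", fun s => PySem.Str.isIn "Year & Dept" s && !PySem.Str.isIn "2" s && !PySem.Str.isIn "3" s && !PySem.Str.isIn "4" s),
    ("n2", fun s => PySem.Str.isIn "Name of the Member 2" s),
    ("d2", fun s => PySem.Str.isIn "Eg: IV - ECE 2" s),
    ("n3", fun s => PySem.Str.isIn "Name of the Member 3" s),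
    ("d3", fun s => PySem.Str.isIn "Eg: IV - ECE 3" s),
    ("n4", fun s => PySem.Str.isIn "Name of the Member 4" s),
    ("d4", fun s => PySem.Str.isIn "Eg: IV - ECE 4" s) ]

-- body of Source B's "for i, h in enumerate(headers)" scan: capture cell values into the vals dict
def pvScanStep (row : List (Option String)) (d : PySem.Dict String (Option String)) (p : Int × Option String) : PySem.Dict String (Option String) :=
  match p.2 with
  | none => d
  | some hs =>
    if hs == "" then d
    else
      let cell : Option String := if p.1 < (row.length : Int) then PySem.List.pyGetD row p.1 none else none
      pvSLOTS.foldl (fun d sl => if !(d.contains sl.1) && sl.2 hs then d.insert sl.1 cell else d) d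

-- body of Source B's "for k in \"1234\"" extraction loop (vals.get(key) merges 'absent' and 'stored None': .join)
def pvBuildStep (vals : PySem.Dict String (Option String)) (members : List (List (String × String))) (k : String) : List (List (String × String)) :=
  match (vals.get? ("n" ++ k)).join with
  | none => members
  | some s =>
    if s == "" then members
    else
      let name := PySem.Str.strip s
      if name == "" || pvBad.contains name then members
      else
        let dept := PySem.Str.strip (((vals.get? ("d" ++ k)).join).getD "")
        members ++ [[("name", name), ("dept", if pvBad.contains dept then "" else dept)]]

def parse_members_alt (row : List (Option String)) (headers : List (Option String)) : List (List (String × String)) :=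
  let vals := (PySem.List.enumerate headers 0).foldl (pvScanStep row) PySem.Dict.empty
  ["1", "2", "3", "4"].foldl (pvBuildStep vals) []

-- ===== PRECONDITION & SPEC =====
def Spec_parse_members (row : List (Option String)) (headers : List (Option String)) (out : List (List (String × String))) : Prop := out = parse_members_alt row headers
instance (row : List (Option String)) (headers : List (Option String)) (out : List (List (String × String))) : Decidable (Spec_parse_members row headers out) := by unfold Spec_parse_members; infer_instance

-- ===== CLAIM (what is proved, stated in full; the proofs are below) =====
def Claim_equal_parse_members : Prop := ∀ (row : List (Option String)) (headers : List (Option String)), Dom_parse_members row headers → Spec_parse_members row headers (parse_members row headers)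

-- ===== LEMMAS AND PROOFS =====

-- cell value captured for index i (Source B's 'row[i] if i < len(row) else None')
def pvCellOf (row : List (Option String)) (i : Int) : Option String :=
  if i < (row.length : Int) then PySem.List.pyGetD row i none else none

-- value-level first-match accumulator
def pvUpdV (o : Option (Option String)) (v : Option String) (b : Bool) : Option (Option String) :=
  if o.isNone && b then some v else o

-- a fold over slots whose keys differ from kk changes neither get? kk nor contains kk
theorem pvInner_skip (kk : String) (cell : Option String) (hs : String)
    (L : List (String × (String → Bool))) (hL : ∀ sl ∈ L, sl.1 ≠ kk)
    (d : PySem.Dict String (Option String)) :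
    (L.foldl (fun d sl => if !(d.contains sl.1) && sl.2 hs then d.insert sl.1 cell else d) d).get? kk = d.get? kk ∧
    (L.foldl (fun d sl => if !(d.contains sl.1) && sl.2 hs then d.insert sl.1 cell else d) d).contains kk = d.contains kk := by
  induction L generalizing d with
  | nil => exact ⟨rfl, rfl⟩
  | cons sl t ih =>
    have hne : sl.1 ≠ kk := hL sl (by simp)
    have ht : ∀ x ∈ t, x.1 ≠ kk := fun x hx => hL x (by simp [hx])
    simp only [List.foldl]
    rcases ih ht (if !(d.contains sl.1) && sl.2 hs then d.insert sl.1 cell else d) with ⟨h1, h2⟩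
    refine ⟨h1.trans ?_, h2.trans ?_⟩
    · split
      · exact PySem.Dict.get?_insert_of_ne _ _ (Ne.symm hne)
      · rfl
    · split
      · rw [PySem.Dict.contains_insert]
        have hk : kk ≠ sl.1 := Ne.symm hne
        simp [hk]
      · rfl

-- effect of the full inner fold on one slot key
theorem pvInner_get (kk : String) (pk : String → Bool) (cell : Option String) (hs : String)
    (pre post : List (String × (String → Bool)))
    (hpre : ∀ sl ∈ pre, sl.1 ≠ kk) (hpost : ∀ sl ∈ post, sl.1 ≠ kk)
    (d : PySem.Dict String (Option String)) :
    ((pre ++ (kk, pk) :: post).foldl (fun d sl => if !(d.contains sl.1) && sl.2 hs then d.insert sl.1 cell else d) d).get? kk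
      = pvUpdV (d.get? kk) cell (pk hs) := by
  rw [List.foldl_append]
  rcases pvInner_skip kk cell hs pre hpre d with ⟨h1, h2⟩
  set d1 := pre.foldl (fun d sl => if !(d.contains sl.1) && sl.2 hs then d.insert sl.1 cell else d) d with hd1
  simp only [List.foldl]
  rcases pvInner_skip kk cell hs post hpost (if !(d1.contains kk) && pk hs then d1.insert kk cell else d1) with ⟨h3, _⟩
  rw [h3]
  have hc : d1.contains kk = (d.get? kk).isSome := by
    rw [h2, PySem.Dict.contains_eq_isSome_get?]
  split
  · next hcond =>
    rw [PySem.Dict.get?_insert_self]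
    rw [hc] at hcond
    have h' : d.get? kk = none ∧ pk hs = true := by simpa using hcond
    unfold pvUpdV
    simp [h'.1, h'.2]
  · next hcond =>
    rw [hc] at hcond
    rw [h1]
    unfold pvUpdV
    cases hdk : d.get? kk with
    | none =>
      rw [hdk] at hcond
      simp at hcond
      simp [hcond]
    | some v => simp

-- one outer scan step, seen through one slot key
theorem pvScan_step_get (row : List (Option String)) (kk : String) (pk : String → Bool)
    (pre post : List (String × (String → Bool)))
    (hsplit : pvSLOTS = pre ++ (kk, pk) :: post)
    (hpre : ∀ sl ∈ pre, sl.1 ≠ kk) (hpost : ∀ sl ∈ post, sl.1 ≠ kk)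
    (d : PySem.Dict String (Option String)) (p : Int × Option String) :
    (pvScanStep row d p).get? kk
      = pvUpdV (d.get? kk) (pvCellOf row p.1)
          ((fun h => match h with | some s => !(s == "") && pk s | none => false) p.2) := by
  obtain ⟨i, h⟩ := p
  cases h with
  | none => simp [pvScanStep, pvUpdV]
  | some hs =>
    by_cases hh : hs = ""
    · simp [pvScanStep, hh, pvUpdV]
    · simp only [pvScanStep]
      rw [if_neg (by simp [hh]), hsplit]
      rw [pvInner_get kk pk _ hs pre post hpre hpost d]
      have hb : (hs == "") = false := by simp [hh]
      simp only [pvCellOf, hb, Bool.not_false, Bool.true_and]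

-- folding pvUpdV from a some is constant
theorem pvFoldV_some (row : List (Option String)) (q : Option String → Bool)
    (l : List (Int × Option String)) (v : Option String) :
    l.foldl (fun o pr => pvUpdV o (pvCellOf row pr.1) (q pr.2)) (some v) = some v := by
  induction l with
  | nil => rfl
  | cons p t ih => simpa [pvUpdV] using ih

-- folding pvUpdV from none captures the cell of the FIRST matching header
theorem pvFoldV_none (row : List (Option String)) (q : Option String → Bool)
    (l : List (Int × Option String)) :
    l.foldl (fun o pr => pvUpdV o (pvCellOf row pr.1) (q pr.2)) none
      = (findHdrA q l).map (pvCellOf row) := by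
  induction l with
  | nil => rfl
  | cons p t ih =>
    obtain ⟨i, h⟩ := p
    simp only [List.foldl, findHdrA]
    cases hq : q h
    · simpa [pvUpdV] using ih
    · simpa [pvUpdV, hq] using pvFoldV_some row q t (pvCellOf row i)

-- the scan fold, seen through one slot key, is the pvUpdV fold
theorem pvScan_fold_get (row : List (Option String)) (kk : String) (pk : String → Bool)
    (pre post : List (String × (String → Bool)))
    (hsplit : pvSLOTS = pre ++ (kk, pk) :: post)
    (hpre : ∀ sl ∈ pre, sl.1 ≠ kk) (hpost : ∀ sl ∈ post, sl.1 ≠ kk)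
    (l : List (Int × Option String)) (d : PySem.Dict String (Option String)) :
    (l.foldl (pvScanStep row) d).get? kk
      = l.foldl (fun o pr => pvUpdV o (pvCellOf row pr.1)
          ((fun h => match h with | some s => !(s == "") && pk s | none => false) pr.2)) (d.get? kk) := by
  induction l generalizing d with
  | nil => rfl
  | cons p t ih =>
    simp only [List.foldl, ih, pvScan_step_get row kk pk pre post hsplit hpre hpost]

-- combined: the vals dict at slot kk = cell of A's first matching index
theorem pvVals_get (row : List (Option String)) (e : List (Int × Option String))
    (kk : String) (pk : String → Bool)
    (pre post : List (String × (String → Bool)))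
    (hsplit : pvSLOTS = pre ++ (kk, pk) :: post)
    (hpre : ∀ sl ∈ pre, sl.1 ≠ kk) (hpost : ∀ sl ∈ post, sl.1 ≠ kk) :
    (e.foldl (pvScanStep row) PySem.Dict.empty).get? kk
      = (findHdrA (fun h => match h with | some s => !(s == "") && pk s | none => false) e).map (pvCellOf row) := by
  rw [pvScan_fold_get row kk pk pre post hsplit hpre hpost, PySem.Dict.get?_empty]
  exact pvFoldV_none row (fun h => match h with | some s => !(s == "") && pk s | none => false) e

-- the value B's extraction reads for an Option Int index
theorem pvJoin_map (row : List (Option String)) (o : Option Int) :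
    ((o.map (pvCellOf row)).join) = (match o with | none => none | some i => pvCellOf row i) := by
  cases o <;> rfl

-- shared per-member value function (proof-side)
def pvMemberV (vn vd : Option String) : Option (List (String × String)) :=
  match vn with
  | none => none
  | some s =>
    if s == "" then none
    else
      let t := PySem.Str.strip s
      if t == "" || pvBad.contains t then none
      else
        let d0 := PySem.Str.strip (vd.getD "")
        some [("name", t), ("dept", if pvBad.contains d0 then "" else d0)]

-- dept expression of A = dept expression of pvMemberV, value form
theorem pvDept_eq (row : List (Option String)) (di : Option Int) :
    (match di with
     | some dIdx =>
       if dIdx < (row.length : Int) then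
         if ["-", "No", "None", "Nil"].contains (PySem.Str.strip ((PySem.List.pyGetD row dIdx none).getD "")) then ""
         else PySem.Str.strip ((PySem.List.pyGetD row dIdx none).getD "")
       else ""
     | none => "") =
    (if ["-", "No", "None", "Nil"].contains (PySem.Str.strip (((match di with | none => none | some i => pvCellOf row i) : Option String).getD "")) then ""
     else PySem.Str.strip (((match di with | none => none | some i => pvCellOf row i) : Option String).getD "")) := by
  have hz : PySem.Str.strip "" = "" := by decide
  cases di with
  | none => simp [hz]
  | some j =>
    by_cases hj : (j : Int) < (row.length : Int)
    · simp [pvCellOf, hj]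
    · simp [pvCellOf, hj, hz]

-- A's loop body produces exactly pvMemberV of the cells at its two indices
theorem pvExtract_eq (row : List (Option String)) (members : List (List (String × String)))
    (pr : Option Int × Option Int) :
    pvExtractA row members pr
      = members ++ (pvMemberV (match pr.1 with | none => none | some i => pvCellOf row i)
                              (match pr.2 with | none => none | some i => pvCellOf row i)).toList := by
  obtain ⟨ni, di⟩ := pr
  cases ni with
  | none => simp [pvExtractA, pvMemberV]
  | some i =>
    simp only [pvExtractA, pvMemberV, pvBad]
    by_cases hi : (i : Int) < (row.length : Int)
    · rw [if_pos hi]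
      unfold pvCellOf
      rw [if_pos hi]
      cases hc : PySem.List.pyGetD row i none with
      | none => simp
      | some s =>
        by_cases hs : s = ""
        · subst hs; simp
        · have hs' : (s == "") = false := by simp [hs]
          by_cases ht : PySem.Str.strip s = ""
          · simp [hs', ht]
          · have ht' : (PySem.Str.strip s == "") = false := by simp [ht]
            cases hb : ["-", "No", "None", "Nil"].contains (PySem.Str.strip s) with
            | true =>
              simp only [hs', ht', hb, Bool.not_true, Bool.not_false, Bool.and_false,
                Bool.and_true, Bool.or_true]
              simp
            | false =>
              simp only [hs', ht', hb, Bool.not_false, Bool.and_true, Bool.or_false]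
              rw [pvDept_eq row di]
              simp [pvCellOf]
    · rw [if_neg hi]
      unfold pvCellOf
      rw [if_neg hi]
      simp

-- B's loop body appends pvMemberV of the two values it reads
theorem pvBuild_eq (vals : PySem.Dict String (Option String)) (members : List (List (String × String))) (k : String) :
    pvBuildStep vals members k
      = members ++ (pvMemberV ((vals.get? ("n" ++ k)).join) ((vals.get? ("d" ++ k)).join)).toList := by
  cases hj : (vals.get? ("n" ++ k)).join with
  | none => simp [pvBuildStep, pvMemberV, hj]
  | some s =>
    simp only [pvBuildStep, pvMemberV, hj]
    by_cases hs : (s == "") = true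
    · simp [hs]
    · rw [if_neg hs, if_neg hs]
      by_cases hcond : (PySem.Str.strip s == "" || pvBad.contains (PySem.Str.strip s)) = true
      · have h' : PySem.Str.strip s = "" ∨ PySem.Str.strip s ∈ pvBad := by simpa using hcond
        simp [h']
      · rw [if_neg hcond, if_neg hcond]
        simp

-- A's fold over pairs is the concatenation of the four pvMemberV results
theorem pvFoldl_extract (row : List (Option String)) :
    ∀ (pairs : List (Option Int × Option Int)) (acc : List (List (String × String))),
      pairs.foldl (pvExtractA row) acc
        = acc ++ pairs.flatMap (fun pr => (pvMemberV (match pr.1 with | none => none | some i => pvCellOf row i)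
                                                     (match pr.2 with | none => none | some i => pvCellOf row i)).toList) := by
  intro pairs
  induction pairs with
  | nil => intro acc; simp
  | cons p t ih =>
    intro acc
    simp only [List.foldl, pvExtract_eq, ih, List.flatMap_cons, List.append_assoc]

theorem pvVals_n1 (row : List (Option String)) (e : List (Int × Option String)) :
    (e.foldl (pvScanStep row) PySem.Dict.empty).get? "n1"
      = (findHdrA (fun h => match h with | some s => !(s == "") && (PySem.Str.isIn "Name of the Member 1" s) | none => false) e).map (pvCellOf row) :=
  pvVals_get row e "n1" _ [] (pvSLOTS.drop 1) rfl (by decide) (by decide)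

theorem pvVals_d1 (row : List (Option String)) (e : List (Int × Option String)) :
    (e.foldl (pvScanStep row) PySem.Dict.empty).get? "d1"
      = (findHdrA (fun h => match h with | some s => !(s == "") && (PySem.Str.isIn "Year & Dept" s && !PySem.Str.isIn "2" s && !PySem.Str.isIn "3" s && !PySem.Str.isIn "4" s) | none => false) e).map (pvCellOf row) :=
  pvVals_get row e "d1" _ (pvSLOTS.take 1) (pvSLOTS.drop 2) rfl (by decide) (by decide)

theorem pvVals_n2 (row : List (Option String)) (e : List (Int × Option String)) :
    (e.foldl (pvScanStep row) PySem.Dict.empty).get? "n2"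
      = (findHdrA (fun h => match h with | some s => !(s == "") && (PySem.Str.isIn "Name of the Member 2" s) | none => false) e).map (pvCellOf row) :=
  pvVals_get row e "n2" _ (pvSLOTS.take 2) (pvSLOTS.drop 3) rfl (by decide) (by decide)

theorem pvVals_d2 (row : List (Option String)) (e : List (Int × Option String)) :
    (e.foldl (pvScanStep row) PySem.Dict.empty).get? "d2"
      = (findHdrA (fun h => match h with | some s => !(s == "") && (PySem.Str.isIn "Eg: IV - ECE 2" s) | none => false) e).map (pvCellOf row) :=
  pvVals_get row e "d2" _ (pvSLOTS.take 3) (pvSLOTS.drop 4) rfl (by decide) (by decide)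

theorem pvVals_n3 (row : List (Option String)) (e : List (Int × Option String)) :
    (e.foldl (pvScanStep row) PySem.Dict.empty).get? "n3"
      = (findHdrA (fun h => match h with | some s => !(s == "") && (PySem.Str.isIn "Name of the Member 3" s) | none => false) e).map (pvCellOf row) :=
  pvVals_get row e "n3" _ (pvSLOTS.take 4) (pvSLOTS.drop 5) rfl (by decide) (by decide)

theorem pvVals_d3 (row : List (Option String)) (e : List (Int × Option String)) :
    (e.foldl (pvScanStep row) PySem.Dict.empty).get? "d3"
      = (findHdrA (fun h => match h with | some s => !(s == "") && (PySem.Str.isIn "Eg: IV - ECE 3" s) | none => false) e).map (pvCellOf row) :=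
  pvVals_get row e "d3" _ (pvSLOTS.take 5) (pvSLOTS.drop 6) rfl (by decide) (by decide)

theorem pvVals_n4 (row : List (Option String)) (e : List (Int × Option String)) :
    (e.foldl (pvScanStep row) PySem.Dict.empty).get? "n4"
      = (findHdrA (fun h => match h with | some s => !(s == "") && (PySem.Str.isIn "Name of the Member 4" s) | none => false) e).map (pvCellOf row) :=
  pvVals_get row e "n4" _ (pvSLOTS.take 6) (pvSLOTS.drop 7) rfl (by decide) (by decide)

theorem pvVals_d4 (row : List (Option String)) (e : List (Int × Option String)) :
    (e.foldl (pvScanStep row) PySem.Dict.empty).get? "d4"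
      = (findHdrA (fun h => match h with | some s => !(s == "") && (PySem.Str.isIn "Eg: IV - ECE 4" s) | none => false) e).map (pvCellOf row) :=
  pvVals_get row e "d4" _ (pvSLOTS.take 7) [] rfl (by decide) (by decide)

-- the four-member assembly, abstracted over the found indices
theorem pvFinal (row : List (Option String)) (o1 o1' o2 o2' o3 o3' o4 o4' : Option Int) :
    ([] : List (List (String × String))) ++ List.flatMap
        (fun pr => (pvMemberV (match pr.1 with | none => none | some i => pvCellOf row i)
                              (match pr.2 with | none => none | some i => pvCellOf row i)).toList)
        [(o1, o1'), (o2, o2'), (o3, o3'), (o4, o4')]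
    = (((([] : List (List (String × String)))
          ++ (pvMemberV ((o1.map (pvCellOf row)).join) ((o1'.map (pvCellOf row)).join)).toList)
          ++ (pvMemberV ((o2.map (pvCellOf row)).join) ((o2'.map (pvCellOf row)).join)).toList)
          ++ (pvMemberV ((o3.map (pvCellOf row)).join) ((o3'.map (pvCellOf row)).join)).toList)
          ++ (pvMemberV ((o4.map (pvCellOf row)).join) ((o4'.map (pvCellOf row)).join)).toList := by
  simp [pvJoin_map]

-- ===== VERDICT (by name: the statement is the Claim_ definition above) =====
set_option maxHeartbeats 1000000 in
theorem parse_members_spec : Claim_equal_parse_members := by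
  intro row headers _
  unfold Spec_parse_members
  simp only [parse_members, parse_members_alt]
  set e := PySem.List.enumerate headers 0 with he
  rw [pvFoldl_extract]
  simp only [List.foldl, pvBuild_eq]
  simp only [show ("n" ++ "1" : String) = "n1" from rfl, show ("d" ++ "1" : String) = "d1" from rfl,
    show ("n" ++ "2" : String) = "n2" from rfl, show ("d" ++ "2" : String) = "d2" from rfl,
    show ("n" ++ "3" : String) = "n3" from rfl, show ("d" ++ "3" : String) = "d3" from rfl,
    show ("n" ++ "4" : String) = "n4" from rfl, show ("d" ++ "4" : String) = "d4" from rfl]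
  rw [pvVals_n1 row e, pvVals_d1 row e, pvVals_n2 row e, pvVals_d2 row e,
      pvVals_n3 row e, pvVals_d3 row e, pvVals_n4 row e, pvVals_d4 row e]
  exact pvFinal row _ _ _ _ _ _ _ _
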